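-- pv_equiv track=rewrite | github.com/VriskaSerket51/CTF_WriteUps | 2023/TUCTF/custom-ecb-cipher/solve.py | inverse1
-- ===== SOURCE A (Python) =====
-- def xor_list(lhs, rhs):
--     return [x ^ y for (x, y) in zip(lhs, rhs)]
--
-- def inverse1(msg, num, helper=None):
--     lhs = msg[0:num]
--     rhs = helper
--     if helper == None:
--         rhs = [0] * num
--     first = xor_list(lhs, rhs)
--     leftover = len(msg) - num
--     if leftover == num:
--         return first + xor_list(msg[num + 1:], first)
--     elif leftover > num:
--         # left = msg[num:num * 2]
--         # ll = xor(left, first)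
--         # first += ll
--         first += inverse1(msg[num:], num, first)
--     else:
--         left = msg[num:]
--         first += xor_list(left, first[:leftover])
--     return first
-- ===== SOURCE B (Python) =====
-- def inverse1(msg, num, helper=None):
--     prev = helper if helper is not None else [0] * num
--     out = []
--     while len(msg) > 2 * num:
--         first = [x ^ y for x, y in zip(msg[:num], prev)]
--         out += first
--         prev = first
--         msg = msg[num:]
--     first = [x ^ y for x, y in zip(msg[:num], prev)]
--     if len(msg) - num == num:
--         return out + first + [x ^ y for x, y in zip(msg[num + 1:], first)]
--     return out + first + [x ^ y for x, y in zip(msg[num:], first[:len(msg) - num])]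
-- ===== Notes on version B (the rewrite author's own statement) =====
-- stated objective: alternative
-- what changed: Replaces A's recursion (each level re-deriving its block and passing the previous block down as 'helper') by a single explicit while-loop with an output accumulator and a 'prev' block, with the two terminal cases handled once after the loop.
import Mathlib
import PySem

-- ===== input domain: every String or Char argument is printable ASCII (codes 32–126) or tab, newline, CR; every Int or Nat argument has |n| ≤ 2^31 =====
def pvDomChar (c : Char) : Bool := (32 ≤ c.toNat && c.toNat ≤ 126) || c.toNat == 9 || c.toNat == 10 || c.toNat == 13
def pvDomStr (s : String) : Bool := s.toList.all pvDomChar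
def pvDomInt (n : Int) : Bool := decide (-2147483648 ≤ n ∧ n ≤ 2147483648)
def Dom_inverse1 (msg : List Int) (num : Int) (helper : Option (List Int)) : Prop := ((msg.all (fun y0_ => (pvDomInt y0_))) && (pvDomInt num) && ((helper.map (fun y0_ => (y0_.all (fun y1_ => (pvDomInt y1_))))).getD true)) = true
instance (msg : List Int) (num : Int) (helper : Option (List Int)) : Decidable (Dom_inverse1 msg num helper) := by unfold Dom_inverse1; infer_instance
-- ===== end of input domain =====

-- B rewrites A's recursion as one explicit while-loop with an accumulator; same cost (objective: alternative decomposition).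

-- ===== PORT A =====
-- xor_list(lhs, rhs)
def xorListA (lhs rhs : List Int) : List Int :=
  (lhs.zip rhs).map (fun p => PySem.Int.bxor p.1 p.2)

-- recursion of A, with a fuel guard only to make the (Python-divergent) num ≤ 0 cases total
def inverse1Go : Nat → List Int → Int → Option (List Int) → List Int
  | 0, _, _, _ => []
  | f+1, msg, num, helper =>
    let lhs := PySem.List.slice msg (some 0) (some num)
    let rhs : List Int :=
      match helper with
      | none => List.replicate num.toNat 0
      | some h => h
    let first := xorListA lhs rhs
    let leftover : Int := (msg.length : Int) - num
    if leftover = num then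
      first ++ xorListA (PySem.List.slice msg (some (num + 1)) none) first
    else if leftover > num then
      first ++ inverse1Go f (PySem.List.slice msg (some num) none) num (some first)
    else
      first ++ xorListA (PySem.List.slice msg (some num) none) (PySem.List.slice first none (some leftover))

def inverse1 (msg : List Int) (num : Int) (helper : Option (List Int)) : List Int :=
  inverse1Go (msg.length + 1) msg num helper

-- ===== PORT B =====
-- [x ^ y for x, y in zip(msg[:num], prev)]
def firstBlock (msg : List Int) (num : Int) (prev : List Int) : List Int :=
  ((PySem.List.slice msg none (some num)).zip prev).map (fun p => PySem.Int.bxor p.1 p.2)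

-- the while-loop of B (fuel guard only for the Python-divergent num ≤ 0 cases)
def inverse1AltLoop : Nat → List Int → Int → List Int → List Int → List Int
  | 0, _, _, _, out => out
  | f+1, msg, num, prev, out =>
    if (msg.length : Int) > 2 * num then
      let first := firstBlock msg num prev
      inverse1AltLoop f (PySem.List.slice msg (some num) none) num first (out ++ first)
    else
      let first := firstBlock msg num prev
      if (msg.length : Int) - num = num then
        out ++ first ++ ((PySem.List.slice msg (some (num + 1)) none).zip first).map (fun p => PySem.Int.bxor p.1 p.2)
      else
        out ++ first ++ ((PySem.List.slice msg (some num) none).zip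
          (PySem.List.slice first none (some ((msg.length : Int) - num)))).map (fun p => PySem.Int.bxor p.1 p.2)

def inverse1_alt (msg : List Int) (num : Int) (helper : Option (List Int)) : List Int :=
  let prev : List Int :=
    match helper with
    | some h => h
    | none => List.replicate num.toNat 0
  inverse1AltLoop (msg.length + 1) msg num prev []

-- ===== PRECONDITION & SPEC =====
-- Pre_ excludes exactly the inputs on which Python A raises RecursionError (num < 0, or num = 0 with a nonempty msg): A never returns there.
def Pre_inverse1 (msg : List Int) (num : Int) (helper : Option (List Int)) : Prop :=
  0 < num ∨ (num = 0 ∧ msg = [])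
instance (msg : List Int) (num : Int) (helper : Option (List Int)) : Decidable (Pre_inverse1 msg num helper) := by unfold Pre_inverse1; infer_instance

def pvWitness_inverse1 : List Int × Int × Option (List Int) := ([1, 2, 3, 4, 5], 2, none)

def Spec_inverse1 (msg : List Int) (num : Int) (helper : Option (List Int)) (out : List Int) : Prop := out = inverse1_alt msg num helper
instance (msg : List Int) (num : Int) (helper : Option (List Int)) (out : List Int) : Decidable (Spec_inverse1 msg num helper out) := by unfold Spec_inverse1; infer_instance

-- ===== CLAIM (what is proved, stated in full; the proofs are below) =====
def Claim_equal_inverse1 : Prop := ∀ (msg : List Int) (num : Int) (helper : Option (List Int)), Dom_inverse1 msg num helper → Pre_inverse1 msg num helper → Spec_inverse1 msg num helper (inverse1 msg num helper)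

-- ===== LEMMAS AND PROOFS =====

-- B's block equals A's block when prev is the rhs: msg[:num] = msg[0:num]
lemma firstBlock_eq (msg : List Int) (num : Int) (prev : List Int) :
    firstBlock msg num prev = xorListA (PySem.List.slice msg (some 0) (some num)) prev := by
  simp [firstBlock, xorListA, PySem.List.slice_zero_start]

-- loop invariant: the loop with accumulator `out` computes `out ++` A's recursion seeded with `some prev`
lemma loop_eq_go : ∀ (f : Nat) (msg : List Int) (num : Int) (prev out : List Int),
    inverse1AltLoop f msg num prev out = out ++ inverse1Go f msg num (some prev) := by
  intro f
  induction f with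
  | zero => intro msg num prev out; simp [inverse1AltLoop, inverse1Go]
  | succ f ih =>
    intro msg num prev out
    by_cases hgt : (msg.length : Int) > 2 * num
    · have hne : ¬ ((msg.length : Int) - num = num) := by omega
      have hlt : (msg.length : Int) - num > num := by omega
      simp only [inverse1AltLoop, inverse1Go, if_pos hgt, if_neg hne, if_pos hlt, firstBlock_eq]
      rw [ih]
      simp [List.append_assoc]
    · by_cases heq : (msg.length : Int) - num = num
      · simp [inverse1AltLoop, inverse1Go, if_neg hgt, if_pos heq, firstBlock_eq, xorListA]
      · have hnlt : ¬ ((msg.length : Int) - num > num) := by omega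
        simp [inverse1AltLoop, inverse1Go, if_neg hgt, if_neg heq, if_neg hnlt, firstBlock_eq, xorListA]

-- seeding with none is the same as seeding with [0]*num
lemma go_none_eq (f : Nat) (msg : List Int) (num : Int) :
    inverse1Go f msg num none = inverse1Go f msg num (some (List.replicate num.toNat 0)) := by
  cases f with
  | zero => rfl
  | succ f => rfl

-- ===== VERDICT (by name: the statement is the Claim_ definition above) =====
theorem inverse1_spec : Claim_equal_inverse1 := by
  intro msg num helper _ _
  unfold Spec_inverse1 inverse1 inverse1_alt
  cases helper with
  | none => rw [go_none_eq, loop_eq_go]; simp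
  | some h => rw [loop_eq_go]; simp
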